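-- pv_equiv track=rewrite | github.com/Zarenk/ti_project_web | backend/ml/train_template_classifier.py | build_tenant_distribution
-- ===== SOURCE A (Python) =====
-- from typing import List, Tuple
--
-- def tenant_key(sample: dict) -> Tuple[str, str]:
--   org = sample.get('organizationId')
--   company = sample.get('companyId')
--   org_part = 'org:' + (str(org) if org is not None else 'null')
--   comp_part = 'comp:' + (str(company) if company is not None else 'null')
--   return org_part, comp_part
--
-- def build_tenant_distribution(samples: List[dict]) -> List[dict]:
--   distribution: dict[Tuple[str, str], dict] = {}
--   for sample in samples:
--     key = tenant_key(sample)
--     if key not in distribution: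
--       distribution[key] = {
--         'organizationId': sample.get('organizationId'),
--         'companyId': sample.get('companyId'),
--         'samples': 0,
--       }
--     distribution[key]['samples'] += 1
--   return list(distribution.values())
-- ===== SOURCE B (Python) =====
-- from typing import List, Tuple
--
-- def tenant_key(sample: dict) -> Tuple[str, str]:
--   org = sample.get('organizationId')
--   company = sample.get('companyId')
--   org_part = 'org:' + (str(org) if org is not None else 'null')
--   comp_part = 'comp:' + (str(company) if company is not None else 'null')
--   return org_part, comp_part
--
-- def build_tenant_distribution(samples: List[dict]) -> List[dict]:
--   # Dict-free partition loop: peel off the first remaining sample's tenant,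
--   # count and remove all its occurrences, repeat on what is left.
--   result = []
--   remaining = samples
--   while remaining:
--     first, rest = remaining[0], remaining[1:]
--     key = tenant_key(first)
--     count = 1 + sum(1 for s in rest if tenant_key(s) == key)
--     result.append({'organizationId': first.get('organizationId'),
--                    'companyId': first.get('companyId'),
--                    'samples': count})
--     remaining = [s for s in rest if tenant_key(s) != key]
--   return result
-- ===== Notes on version B (the rewrite author's own statement) =====
-- stated objective: alternative
-- what changed: Replaces A's dict-of-counters single pass with a dict-free repeated-partition loop: peel the first remaining sample's tenant, count and remove all samples of that tenant from the remaining list, and repeat; first-occurrence order falls out of the peeling order.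
import Mathlib
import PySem

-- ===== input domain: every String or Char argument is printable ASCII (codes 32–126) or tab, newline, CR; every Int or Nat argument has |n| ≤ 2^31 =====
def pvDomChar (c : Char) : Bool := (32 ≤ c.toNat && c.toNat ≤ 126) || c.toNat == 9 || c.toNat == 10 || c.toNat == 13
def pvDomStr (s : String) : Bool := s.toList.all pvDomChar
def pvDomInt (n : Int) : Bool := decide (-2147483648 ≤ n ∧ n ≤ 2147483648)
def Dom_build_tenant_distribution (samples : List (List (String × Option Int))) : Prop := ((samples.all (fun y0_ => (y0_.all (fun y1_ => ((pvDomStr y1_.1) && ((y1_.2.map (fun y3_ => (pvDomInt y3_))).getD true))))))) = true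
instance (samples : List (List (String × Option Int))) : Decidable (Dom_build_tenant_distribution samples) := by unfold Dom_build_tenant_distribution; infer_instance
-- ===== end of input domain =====

-- B replaces A's dict-of-counters pass by a dict-free repeated-partition loop (peel first tenant, count and remove it, repeat); same return value, objective: alternative decomposition.


-- ===== PORT A =====
-- sample.get(k): first-match lookup in the association list; missing key and stored None both give none (Python returns None in both cases)
def pvGet (sample : List (String × Option Int)) (k : String) : Option Int :=
  ((PySem.Dict.mk sample).get? k).join

-- str(org) if org is not None else 'null'
def pvStrOf : Option Int → String
  | some n => PySem.Int.toStr n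
  | none => "null"

-- helper tenant_key, shared by A and B exactly as in the Python sources
def pvTenantKey (sample : List (String × Option Int)) : String × String :=
  ("org:" ++ pvStrOf (pvGet sample "organizationId"),
   "comp:" ++ pvStrOf (pvGet sample "companyId"))

-- one iteration of A's for-loop; distribution[key]['samples'] += 1 is modelled with
-- Dict.modify (the defaults 'Dict.mk []' / 'none' / 'getD 0' are never consulted: the key
-- was just inserted and its 'samples' field is always an int)
def pvStepA (d : PySem.Dict (String × String) (PySem.Dict String (Option Int)))
    (sample : List (String × Option Int)) :
    PySem.Dict (String × String) (PySem.Dict String (Option Int)) :=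
  let key := pvTenantKey sample
  let d := if d.contains key then d
           else d.insert key (PySem.Dict.mk
             [("organizationId", pvGet sample "organizationId"),
              ("companyId", pvGet sample "companyId"),
              ("samples", some 0)])
  d.modify key (PySem.Dict.mk []) (fun r => r.modify "samples" none (fun v => some (v.getD 0 + 1)))

def build_tenant_distribution (samples : List (List (String × Option Int))) : List (List (String × Option Int)) :=
  ((samples.foldl pvStepA (PySem.Dict.mk [])).values).map PySem.Dict.items

-- ===== PORT B =====
-- the while loop of Source B: pop the first remaining sample's tenant, count it in the rest
-- (sum(1 for …) = countP), keep only the other tenants, loop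
def pvLoopB (remaining : List (List (String × Option Int))) (result : List (List (String × Option Int))) :
    List (List (String × Option Int)) :=
  match remaining with
  | [] => result
  | first :: rest =>
    let key := pvTenantKey first
    let count : Int := 1 + ((rest.countP (fun s => pvTenantKey s == key) : Nat) : Int)
    pvLoopB (rest.filter (fun s => !(pvTenantKey s == key)))
      (result ++ [[("organizationId", pvGet first "organizationId"),
                   ("companyId", pvGet first "companyId"),
                   ("samples", some count)]])
  termination_by remaining.length
  decreasing_by
    simp only [List.length_unattach]
    exact Nat.lt_succ_of_le (le_trans (List.length_filter_le _ _) (by simp))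

def build_tenant_distribution_alt (samples : List (List (String × Option Int))) : List (List (String × Option Int)) :=
  pvLoopB samples []

-- ===== PRECONDITION & SPEC =====
def Spec_build_tenant_distribution (samples : List (List (String × Option Int))) (out : List (List (String × Option Int))) : Prop := out = build_tenant_distribution_alt samples
instance (samples : List (List (String × Option Int))) (out : List (List (String × Option Int))) : Decidable (Spec_build_tenant_distribution samples out) := by unfold Spec_build_tenant_distribution; infer_instance

-- ===== CLAIM (what is proved, stated in full; the proofs are below) =====
def Claim_equal_build_tenant_distribution : Prop := ∀ (samples : List (List (String × Option Int))), Dom_build_tenant_distribution samples → Spec_build_tenant_distribution samples (build_tenant_distribution samples)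

-- ===== LEMMAS AND PROOFS =====

-- the row both programs emit for a tenant with representative sample s and count n
def pvRow (s : List (String × Option Int)) (n : Int) : List (String × Option Int) :=
  [("organizationId", pvGet s "organizationId"),
   ("companyId", pvGet s "companyId"),
   ("samples", some n)]

-- the record A keeps for a tenant whose representative sample is s and whose running count is n
def pvRec (s : List (String × Option Int)) (n : Int) : PySem.Dict String (Option Int) :=
  PySem.Dict.mk (pvRow s n)

lemma pvRec_step (s : List (String × Option Int)) (n : Int) :
    (pvRec s n).modify "samples" none (fun v => some (v.getD 0 + 1)) = pvRec s (n + 1) := by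
  simp [pvRec, pvRow, PySem.Dict.modify, PySem.Dict.insert, PySem.Dict.getD, PySem.Dict.get?,
        PySem.Dict.contains]

lemma pvStepA_contains {d : PySem.Dict (String × String) (PySem.Dict String (Option Int))}
    {s : List (String × Option Int)} (h : d.contains (pvTenantKey s) = true) :
    pvStepA d s = d.insert (pvTenantKey s)
      ((d.getD (pvTenantKey s) (PySem.Dict.mk [])).modify "samples" none
        (fun v => some (v.getD 0 + 1))) := by
  simp [pvStepA, h, PySem.Dict.modify]

lemma pvStepA_not_contains {d : PySem.Dict (String × String) (PySem.Dict String (Option Int))}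
    {s : List (String × Option Int)} (h : d.contains (pvTenantKey s) = false) :
    pvStepA d s = d.insert (pvTenantKey s) (pvRec s 1) := by
  have h0 : (PySem.Dict.mk
      [("organizationId", pvGet s "organizationId"),
       ("companyId", pvGet s "companyId"),
       ("samples", some 0)]) = pvRec s 0 := rfl
  simp only [pvStepA, h, Bool.false_eq_true, if_false, PySem.Dict.modify,
    PySem.Dict.getD_insert_self, h0, PySem.Dict.insert_insert_self]
  rfl

-- the reference grouping: first-occurrence representatives in order
def pvRepsFold (l : List (List (String × Option Int))) :
    PySem.Dict (String × String) (List (String × Option Int)) :=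
  l.foldl (fun d s => d.setdefault (pvTenantKey s) s) (PySem.Dict.mk [])

lemma pv_fst_unique {L : List ((String × String) × List (String × Option Int))}
    {k : String × String} {v w : List (String × Option Int)}
    (h1 : (k, v) ∈ (PySem.Dict.mk L).items) (h2 : (k, w) ∈ (PySem.Dict.mk L).items)
    (hnd : (PySem.Dict.mk L).keys.Nodup) : v = w := by
  have e1 := PySem.Dict.get?_of_mem_items _ h1 hnd
  have e2 := PySem.Dict.get?_of_mem_items _ h2 hnd
  rw [e1] at e2
  exact Option.some_injective _ e2

-- A-side loop invariant: A's dict is the representative dict with each value rendered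
-- through pvRec at the key's multiplicity in l
lemma pv_invariant (l : List (List (String × Option Int))) :
    (pvRepsFold l).keys.Nodup ∧
    (∀ j, j ∈ (pvRepsFold l).keys ↔ j ∈ l.map pvTenantKey) ∧
    (l.foldl pvStepA (PySem.Dict.mk [])).items =
      (pvRepsFold l).items.map
        (fun p => (p.1, pvRec p.2 (((l.map pvTenantKey).count p.1 : Nat) : Int))) := by
  induction l using List.reverseRecOn with
  | nil =>
      refine ⟨by simp [pvRepsFold, PySem.Dict.keys], by simp [pvRepsFold, PySem.Dict.keys], ?_⟩
      simp [pvRepsFold]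
  | append_singleton l s ih =>
      obtain ⟨hnd, hmem, hitems⟩ := ih
      have hR : pvRepsFold (l ++ [s]) = (pvRepsFold l).setdefault (pvTenantKey s) s := by
        simp [pvRepsFold, List.foldl_append]
      have hD : (l ++ [s]).foldl pvStepA (PySem.Dict.mk []) =
          pvStepA (l.foldl pvStepA (PySem.Dict.mk [])) s := by
        simp [List.foldl_append]
      have hkeysD : (l.foldl pvStepA (PySem.Dict.mk [])).keys = (pvRepsFold l).keys := by
        simp [PySem.Dict.keys, hitems, List.map_map]
      have hcont : (l.foldl pvStepA (PySem.Dict.mk [])).contains (pvTenantKey s) =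
          (pvRepsFold l).contains (pvTenantKey s) := by
        rw [PySem.Dict.contains_eq_decide_mem_keys, PySem.Dict.contains_eq_decide_mem_keys, hkeysD]
      have hcount_app : ∀ j : String × String,
          ((l ++ [s]).map pvTenantKey).count j
            = (l.map pvTenantKey).count j + (if j = pvTenantKey s then 1 else 0) := by
        intro j
        by_cases hj : j = pvTenantKey s <;>
          simp [hj, List.count_append, eq_comm]
      by_cases hc : (pvRepsFold l).contains (pvTenantKey s) = true
      · -- key already present: reps unchanged, A replaces the record at the key
        have hmemk : pvTenantKey s ∈ (pvRepsFold l).keys := by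
          have := PySem.Dict.contains_eq_decide_mem_keys (pvRepsFold l) (pvTenantKey s)
          rw [hc] at this; exact of_decide_eq_true this.symm
        obtain ⟨p, hp, hp1⟩ := List.mem_map.mp hmemk
        obtain ⟨kk, v⟩ := p
        simp only at hp1; subst hp1
        have hrecmem : (pvTenantKey s,
            pvRec v (((l.map pvTenantKey).count (pvTenantKey s) : Nat) : Int))
            ∈ (l.foldl pvStepA (PySem.Dict.mk [])).items := by
          rw [hitems]; exact List.mem_map.mpr ⟨(pvTenantKey s, v), hp, rfl⟩
        have hndD : (l.foldl pvStepA (PySem.Dict.mk [])).keys.Nodup := by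
          rw [hkeysD]; exact hnd
        have hgetD : (l.foldl pvStepA (PySem.Dict.mk [])).getD (pvTenantKey s) (PySem.Dict.mk [])
            = pvRec v (((l.map pvTenantKey).count (pvTenantKey s) : Nat) : Int) :=
          PySem.Dict.getD_of_mem_items _ hrecmem hndD _
        have hcontD : (l.foldl pvStepA (PySem.Dict.mk [])).contains (pvTenantKey s) = true := by
          rw [hcont]; exact hc
        refine ⟨?_, ?_, ?_⟩
        · rw [hR, PySem.Dict.setdefault_of_contains _ _ hc]; exact hnd
        · intro j
          rw [hR, PySem.Dict.setdefault_of_contains _ _ hc]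
          constructor
          · intro h; simp only [List.map_append, List.mem_append]
            exact Or.inl ((hmem j).mp h)
          · intro h
            rw [List.map_append] at h
            rcases List.mem_append.mp h with h' | h'
            · exact (hmem j).mpr h'
            · have hj : j = pvTenantKey s := by simpa using h'
              exact hj ▸ hmemk
        · rw [hR, PySem.Dict.setdefault_of_contains _ _ hc, hD, pvStepA_contains hcontD,
            hgetD, pvRec_step]
          rw [PySem.Dict.items_insert_of_contains _ _ hcontD, hitems, List.map_map]
          refine List.map_congr_left ?_
          rintro ⟨j, w⟩ hq
          simp only [Function.comp_apply]
          by_cases hjk : j = pvTenantKey s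
          · subst hjk
            have hvw : w = v := pv_fst_unique hq hp hnd
            subst hvw
            simp only [beq_self_eq_true, if_true]
            rw [hcount_app]
            simp
          · have hb : (j == pvTenantKey s) = false := beq_false_of_ne hjk
            simp only [hb]
            rw [hcount_app]
            simp [hjk]
      · -- fresh key: both sides append one entry
        have hc' : (pvRepsFold l).contains (pvTenantKey s) = false := by
          simpa using hc
        have hnotmemk : pvTenantKey s ∉ (pvRepsFold l).keys := by
          intro h
          have := PySem.Dict.contains_eq_decide_mem_keys (pvRepsFold l) (pvTenantKey s)
          rw [hc'] at this
          exact (of_decide_eq_false this.symm) h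
        have hnotl : pvTenantKey s ∉ l.map pvTenantKey := fun h => hnotmemk ((hmem _).mpr h)
        have hcnt0 : (l.map pvTenantKey).count (pvTenantKey s) = 0 :=
          List.count_eq_zero.mpr hnotl
        have hcontD : (l.foldl pvStepA (PySem.Dict.mk [])).contains (pvTenantKey s) = false := by
          rw [hcont]; exact hc'
        have hRins : pvRepsFold (l ++ [s]) = (pvRepsFold l).insert (pvTenantKey s) s := by
          rw [hR, PySem.Dict.setdefault_of_not_contains _ _ hc']
        have hRitems : (pvRepsFold (l ++ [s])).items
            = (pvRepsFold l).items ++ [(pvTenantKey s, s)] :=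
          hRins ▸ PySem.Dict.items_insert_of_not_contains _ _ hc'
        have hRkeys : (pvRepsFold (l ++ [s])).keys = (pvRepsFold l).keys ++ [pvTenantKey s] := by
          simp [PySem.Dict.keys, hRitems]
        refine ⟨?_, ?_, ?_⟩
        · rw [hRkeys]
          simp only [List.nodup_append, List.nodup_singleton, true_and]
          refine ⟨hnd, ?_⟩
          intro a ha b hb
          simp only [List.mem_singleton] at hb
          subst hb
          exact fun h => hnotmemk (h ▸ ha)
        · intro j
          rw [hRkeys]
          simp only [List.mem_append, List.map_append, List.map_cons,
            List.map_nil, List.mem_cons, List.not_mem_nil, or_false]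
          exact or_congr (hmem j) Iff.rfl
        · rw [hD, pvStepA_not_contains hcontD]
          rw [PySem.Dict.items_insert_of_not_contains _ _ hcontD, hitems, hRitems,
            List.map_append]
          congr 1
          · refine List.map_congr_left ?_
            rintro ⟨j, w⟩ hq
            have hjmem : j ∈ (pvRepsFold l).keys :=
              List.mem_map_of_mem (f := Prod.fst) hq
            have hjk : j ≠ pvTenantKey s := fun h => hnotmemk (h ▸ hjmem)
            simp only
            rw [hcount_app]
            simp [hjk]
          · simp [hcnt0, pvRec, pvRow]

-- folding setdefault over samples whose key is already present skips them
lemma pv_fold_skip (t : List (List (String × Option Int)))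
    (d : PySem.Dict (String × String) (List (String × Option Int))) (k : String × String)
    (hc : d.contains k = true) :
    t.foldl (fun d s => d.setdefault (pvTenantKey s) s) d
      = (t.filter (fun s => !(pvTenantKey s == k))).foldl
          (fun d s => d.setdefault (pvTenantKey s) s) d := by
  induction t generalizing d with
  | nil => rfl
  | cons x t ih =>
      by_cases hx : (pvTenantKey x == k) = true
      · have hk : pvTenantKey x = k := eq_of_beq hx
        have hcx : d.contains (pvTenantKey x) = true := hk ▸ hc
        simp only [List.foldl_cons, List.filter_cons, hx, Bool.not_true]
        rw [PySem.Dict.setdefault_of_contains _ _ hcx]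
        exact ih d hc
      · have hcx : (d.setdefault (pvTenantKey x) x).contains k = true := by
          rw [PySem.Dict.contains_setdefault]
          simp [hc]
        simp only [List.foldl_cons, List.filter_cons, eq_false_of_ne_true hx, Bool.not_false,
          if_true]
        exact ih _ hcx

-- peeling a head entry off the accumulator dict commutes with the setdefault fold
lemma pv_fold_peel (t : List (List (String × Option Int)))
    (d1 d2 : PySem.Dict (String × String) (List (String × Option Int)))
    (k : String × String) (s : List (String × Option Int))
    (ht : ∀ x ∈ t, (pvTenantKey x == k) = false)
    (h12 : d1.items = (k, s) :: d2.items) :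
    (t.foldl (fun d s => d.setdefault (pvTenantKey s) s) d1).items
      = (k, s) :: (t.foldl (fun d s => d.setdefault (pvTenantKey s) s) d2).items := by
  induction t generalizing d1 d2 with
  | nil => simpa using h12
  | cons x t ih =>
      have hxk : pvTenantKey x ≠ k := by
        intro h
        have := ht x (List.mem_cons_self)
        rw [h] at this; simp at this
      have hkeys : d1.keys = k :: d2.keys := by
        simp [PySem.Dict.keys, h12]
      have hcont : d1.contains (pvTenantKey x) = d2.contains (pvTenantKey x) := by
        rw [PySem.Dict.contains_eq_decide_mem_keys, PySem.Dict.contains_eq_decide_mem_keys, hkeys]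
        simp [hxk]
      simp only [List.foldl_cons]
      by_cases hc : d2.contains (pvTenantKey x) = true
      · rw [PySem.Dict.setdefault_of_contains _ _ (hcont ▸ hc),
          PySem.Dict.setdefault_of_contains _ _ hc]
        exact ih _ _ (fun y hy => ht y (List.mem_cons_of_mem _ hy)) h12
      · have hc1 : d1.contains (pvTenantKey x) = false := by
          rw [hcont]; simpa using hc
        have hc2 : d2.contains (pvTenantKey x) = false := by simpa using hc
        rw [PySem.Dict.setdefault_of_not_contains _ _ hc1,
          PySem.Dict.setdefault_of_not_contains _ _ hc2]
        refine ih _ _ (fun y hy => ht y (List.mem_cons_of_mem _ hy)) ?_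
        rw [PySem.Dict.items_insert_of_not_contains _ _ hc1,
          PySem.Dict.items_insert_of_not_contains _ _ hc2, h12]
        rfl

-- counts over the key list survive filtering away a different key
lemma pv_count_filter (t : List (List (String × Option Int))) (k j : String × String)
    (hjk : j ≠ k) :
    (((t.filter (fun s => !(pvTenantKey s == k))).map pvTenantKey).count j)
      = ((t.map pvTenantKey).count j) := by
  induction t with
  | nil => rfl
  | cons x t ih =>
      by_cases hx : (pvTenantKey x == k) = true
      · have hk : pvTenantKey x = k := eq_of_beq hx
        have : j ≠ pvTenantKey x := hk ▸ hjk
        simp [hx, ih, Ne.symm this]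
      · simp [eq_false_of_ne_true hx, List.count_cons, ih]

-- sum(1 for s in rest if key(s)==k) counts k in the key list
lemma pv_countP_eq_count (t : List (List (String × Option Int))) (k : String × String) :
    t.countP (fun s => pvTenantKey s == k) = (t.map pvTenantKey).count k := by
  induction t with
  | nil => rfl
  | cons x t ih => simp [List.countP_cons, List.count_cons, ih]

-- B's loop, characterised by the reference grouping
lemma pvB_loop (l acc : List (List (String × Option Int))) :
    pvLoopB l acc = acc ++ (pvRepsFold l).items.map
      (fun p => pvRow p.2 (((l.map pvTenantKey).count p.1 : Nat) : Int)) := by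
  induction l, acc using pvLoopB.induct with
  | case1 acc => simp [pvLoopB, pvRepsFold]
  | case2 acc first rest key count ih =>
      simp only [key, count] at ih ⊢
      rw [pvLoopB]
      simp only [List.unattach_filter, List.unattach_attach] at ih ⊢
      rw [ih]
      have hfilt : ∀ x ∈ rest.filter (fun s => !(pvTenantKey s == pvTenantKey first)),
          (pvTenantKey x == pvTenantKey first) = false := by
        intro x hx
        have := List.of_mem_filter hx
        simpa using this
      obtain ⟨hnd', hmem', -⟩ :=
        pv_invariant (rest.filter (fun s => !(pvTenantKey s == pvTenantKey first)))
      have hck : (PySem.Dict.mk [(pvTenantKey first, first)] :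
          PySem.Dict (String × String) (List (String × Option Int))).contains
            (pvTenantKey first) = true := by
        simp [PySem.Dict.contains]
      have hrep0 : pvRepsFold (first :: rest)
          = rest.foldl (fun d s => d.setdefault (pvTenantKey s) s)
              (PySem.Dict.mk [(pvTenantKey first, first)]) := by
        simp only [pvRepsFold, List.foldl_cons]
        congr 1
      have hitems : (pvRepsFold (first :: rest)).items
          = (pvTenantKey first, first)
              :: (pvRepsFold (rest.filter (fun s => !(pvTenantKey s == pvTenantKey first)))).items := by
        rw [hrep0, pv_fold_skip rest _ (pvTenantKey first) hck]
        exact pv_fold_peel _ _ _ _ first hfilt rfl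
      have hcnt_head : ((first :: rest).map pvTenantKey).count (pvTenantKey first)
          = 1 + rest.countP (fun s => pvTenantKey s == pvTenantKey first) := by
        rw [List.map_cons, List.count_cons, pv_countP_eq_count]
        simp [Nat.add_comm]
      have hcnt_tail : ∀ p ∈ (pvRepsFold
            (rest.filter (fun s => !(pvTenantKey s == pvTenantKey first)))).items,
          (pvTenantKey first :: rest.map pvTenantKey).count p.1
            = ((rest.filter (fun s => !(pvTenantKey s == pvTenantKey first))).map
                pvTenantKey).count p.1 := by
        intro p hp
        have hpk : p.1 ∈ (rest.filter (fun s => !(pvTenantKey s == pvTenantKey first))).map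
            pvTenantKey :=
          (hmem' p.1).mp (List.mem_map_of_mem (f := Prod.fst) hp)
        obtain ⟨x, hx, hxe⟩ := List.mem_map.mp hpk
        have hne : p.1 ≠ pvTenantKey first := by
          intro h
          have := hfilt x hx
          rw [hxe, h] at this; simp at this
        rw [List.count_cons, if_neg (by simpa using Ne.symm hne),
          pv_count_filter rest (pvTenantKey first) p.1 hne]
        simp
      rw [hitems]
      simp only [List.map_cons, List.append_assoc, List.singleton_append]
      congr 1
      congr 1
      · -- head row
        simp only [pvRow, List.count_cons, beq_self_eq_true, if_pos, pv_countP_eq_count]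
        push_cast
        ring_nf
      · -- tail rows
        refine List.map_congr_left ?_
        intro p hp
        rw [hcnt_tail p hp]

theorem pv_spec_aux (samples : List (List (String × Option Int))) :
    build_tenant_distribution samples = build_tenant_distribution_alt samples := by
  obtain ⟨_, _, hitems⟩ := pv_invariant samples
  unfold build_tenant_distribution build_tenant_distribution_alt
  rw [pvB_loop samples []]
  simp only [PySem.Dict.values, hitems, List.map_map, List.nil_append]
  rfl

-- ===== VERDICT (by name: the statement is the Claim_ definition above) =====
theorem build_tenant_distribution_spec : Claim_equal_build_tenant_distribution := by
  intro samples _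
  exact pv_spec_aux samples
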